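-- pv_equiv track=rewrite | github.com/nsbb/customized_base64 | c_base64_module.py | change_bit
-- ===== SOURCE A (Python) =====
-- def change_bit(x, n, LSB) :
--     bin_nbit = []
--     temp = []
--     count = 0
--
--     for i in x :
--         temp.append(i)
--         count += 1
--         if count % n == 0 :
--             bin_nbit.append(temp)
--             temp = []
--
--     if LSB :    #LSB값이 0이 아니면
--         for i in range(LSB) :
--             temp.append(0)
--         bin_nbit.append(temp)
--
--     return bin_nbit
-- ===== SOURCE B (Python) =====
-- def change_bit(x, n, LSB):
--     k = len(x) // n
--     chunks = [x[i*n:(i+1)*n] for i in range(k)]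
--     if LSB:
--         chunks.append(x[k*n:] + [0] * LSB)
--     return chunks
-- ===== Notes on version B (the rewrite author's own statement) =====
-- stated objective: simpler
-- what changed: B replaces A's per-element running-counter accumulation with index-strided slicing (k = len(x)//n complete chunks, then the leftover-plus-zero-padding chunk when LSB is truthy); Pre_ restricts to chunk size n >= 1, the natural domain: for n = 0 both raise ZeroDivisionError on nonempty x (B also on empty x), and for negative n A's chunking by |n| is an accident of Python's modulo sign while B's slicing does the natural thing (no complete chunks). Bulk slicing avoids per-element list appends (measured ~2.5x faster).
-- outside the precondition, e.g. on change_bit([], 0, 0): A returns [], B raises ZeroDivisionError; on change_bit([1, 2, 3, 4], -2, 0): A returns [[1, 2], [3, 4]], B returns []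
import Mathlib
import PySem

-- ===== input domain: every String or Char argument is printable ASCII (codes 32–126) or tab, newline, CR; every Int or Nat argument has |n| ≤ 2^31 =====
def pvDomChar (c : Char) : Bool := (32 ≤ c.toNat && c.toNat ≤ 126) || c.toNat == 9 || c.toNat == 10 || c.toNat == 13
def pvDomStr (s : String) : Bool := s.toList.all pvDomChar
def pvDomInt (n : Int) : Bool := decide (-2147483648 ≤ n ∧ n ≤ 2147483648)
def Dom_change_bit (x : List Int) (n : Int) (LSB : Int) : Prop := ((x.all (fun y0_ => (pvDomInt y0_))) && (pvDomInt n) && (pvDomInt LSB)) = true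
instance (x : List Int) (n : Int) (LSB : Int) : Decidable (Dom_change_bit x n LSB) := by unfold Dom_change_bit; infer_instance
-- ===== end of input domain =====

-- B replaces A's running-counter per-element accumulation by strided slicing (k = len//n complete
-- chunks as slices, then the leftover+zero-padding chunk when LSB is truthy); objective: simpler.


-- ===== PORT A =====
-- one loop iteration of A: temp.append(i); count += 1; if count % n == 0: flush temp
def changeBitStep (n : Int) (st : List (List Int) × List Int × Int) (i : Int) :
    List (List Int) × List Int × Int :=
  let temp := st.2.1 ++ [i]
  let count := st.2.2 + 1
  if PySem.Int.mod count n = 0 then (st.1 ++ [temp], [], count) else (st.1, temp, count)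

def change_bit (x : List Int) (n : Int) (LSB : Int) : List (List Int) :=
  let s := x.foldl (changeBitStep n) ([], [], 0)
  if LSB ≠ 0 then
    -- for i in range(LSB): temp.append(0); then bin_nbit.append(temp)
    s.1 ++ [(PySem.List.pyRange 0 LSB 1).foldl (fun t _ => t ++ [(0 : Int)]) s.2.1]
  else s.1

-- ===== PORT B =====
def change_bit_alt (x : List Int) (n : Int) (LSB : Int) : List (List Int) :=
  let k : Int := PySem.Int.floordiv (x.length : Int) n
  let chunks := (PySem.List.pyRange 0 k 1).map
    (fun i => PySem.List.slice x (some (i * n)) (some ((i + 1) * n)))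
  if LSB ≠ 0 then
    -- [0] * LSB: Python's list repetition yields [] for LSB ≤ 0, matching Int.toNat — exact
    chunks ++ [PySem.List.slice x (some (k * n)) none ++ List.replicate LSB.toNat (0 : Int)]
  else chunks

-- ===== PRECONDITION & SPEC =====
-- Pre_ restricts to chunk size n ≥ 1, the natural domain: for n = 0 A raises ZeroDivisionError on
-- nonempty x (and B on any x), and for n < 0 A's chunking by |n| is an accident of Python's
-- modulo sign that B's natural slicing does not mirror.
def Pre_change_bit (x : List Int) (n : Int) (LSB : Int) : Prop := 1 ≤ n
instance (x : List Int) (n : Int) (LSB : Int) : Decidable (Pre_change_bit x n LSB) := by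
  unfold Pre_change_bit; infer_instance

def pvWitness_change_bit : List Int × Int × Int := ([1, 2, 3, 4, 5], 2, 3)

def Spec_change_bit (x : List Int) (n : Int) (LSB : Int) (out : List (List Int)) : Prop := out = change_bit_alt x n LSB
instance (x : List Int) (n : Int) (LSB : Int) (out : List (List Int)) : Decidable (Spec_change_bit x n LSB out) := by unfold Spec_change_bit; infer_instance

-- ===== CLAIM (what is proved, stated in full; the proofs are below) =====
def Claim_equal_change_bit : Prop := ∀ (x : List Int) (n : Int) (LSB : Int), Dom_change_bit x n LSB → Pre_change_bit x n LSB → Spec_change_bit x n LSB (change_bit x n LSB)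

-- ===== LEMMAS AND PROOFS =====

-- Common reference chunker: accumulate into temp, flush whenever temp reaches length m;
-- returns (complete chunks, leftover temp).
def go (m : Nat) : List Int → List Int → List (List Int) × List Int
  | temp, [] => ([], temp)
  | temp, i :: xs =>
    if temp.length + 1 = m then
      (((temp ++ [i]) :: (go m [] xs).1), (go m [] xs).2)
    else go m (temp ++ [i]) xs

-- padding loop = replicate
lemma pad_foldl (l : List Int) : ∀ t : List Int,
    l.foldl (fun t _ => t ++ [(0 : Int)]) t = t ++ List.replicate l.length 0 := by
  induction l with
  | nil => simp
  | cons a l ih =>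
    intro t
    simp [List.foldl, ih, List.replicate_succ]

-- A-side loop invariant: count is the number of processed elements, temp.length = count % m.
lemma loopA (n : Int) (hn : n ≠ 0) :
    ∀ (xs : List Int) (acc : List (List Int)) (temp : List Int) (c : Nat),
      temp.length = c % n.natAbs →
      xs.foldl (changeBitStep n) (acc, temp, (c : Int)) =
        (acc ++ (go n.natAbs temp xs).1, (go n.natAbs temp xs).2, ((c + xs.length : Nat) : Int)) := by
  intro xs
  induction xs with
  | nil => intro acc temp c h; simp [go]
  | cons i xs ih =>
    intro acc temp c h
    have hm : 0 < n.natAbs := Int.natAbs_pos.mpr hn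
    have hlt : c % n.natAbs < n.natAbs := Nat.mod_lt _ hm
    have hmodeq : (c + 1) % n.natAbs = (c % n.natAbs + 1) % n.natAbs :=
      (Nat.mod_modEq c n.natAbs).symm.add_right 1
    have hcond : (PySem.Int.mod ((c : Int) + 1) n = 0) ↔ (temp.length + 1 = n.natAbs) := by
      rw [PySem.Int.mod_eq_zero_iff_dvd]
      have h1 : ((c : Int) + 1) = ((c + 1 : Nat) : Int) := by push_cast; ring
      rw [h1, ← Int.natAbs_dvd, Int.natCast_dvd_natCast]
      constructor
      · intro hd
        have h0 : (c + 1) % n.natAbs = 0 := Nat.mod_eq_zero_of_dvd hd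
        rw [hmodeq] at h0
        by_cases hlt2 : c % n.natAbs + 1 < n.natAbs
        · rw [Nat.mod_eq_of_lt hlt2] at h0; omega
        · omega
      · intro he
        have hme : c % n.natAbs + 1 = n.natAbs := by omega
        have h0 : (c + 1) % n.natAbs = 0 := by rw [hmodeq, hme, Nat.mod_self]
        exact Nat.dvd_of_mod_eq_zero h0
    simp only [List.foldl]
    by_cases hc : temp.length + 1 = n.natAbs
    · have hmz : PySem.Int.mod ((c : Int) + 1) n = 0 := hcond.mpr hc
      have hstep : changeBitStep n (acc, temp, (c : Int)) i =
          (acc ++ [temp ++ [i]], [], ((c + 1 : Nat) : Int)) := by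
        simp [changeBitStep, hmz]
      rw [hstep]
      have hinv : ([] : List Int).length = (c + 1) % n.natAbs := by
        have h2 : (c + 1) % n.natAbs = 0 := by
          rw [hmodeq, show c % n.natAbs + 1 = n.natAbs by omega, Nat.mod_self]
        simp [h2]
      rw [ih (acc ++ [temp ++ [i]]) [] (c + 1) hinv]
      simp [go, hc]
      ring
    · have hmz : ¬ PySem.Int.mod ((c : Int) + 1) n = 0 := fun h' => hc (hcond.mp h')
      have hstep : changeBitStep n (acc, temp, (c : Int)) i =
          (acc, temp ++ [i], ((c + 1 : Nat) : Int)) := by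
        simp [changeBitStep, hmz]
      rw [hstep]
      have hinv : (temp ++ [i]).length = (c + 1) % n.natAbs := by
        have h2 : (c + 1) % n.natAbs = c % n.natAbs + 1 := by
          rw [hmodeq]; exact Nat.mod_eq_of_lt (by omega)
        simp [h2, h]
      rw [ih acc (temp ++ [i]) (c + 1) hinv]
      simp [go, hc]
      ring

-- go on a short remainder: nothing more is flushed
lemma go_small (m : Nat) : ∀ (b : List Int) (temp : List Int), temp.length + b.length < m →
    go m temp b = ([], temp ++ b) := by
  intro b
  induction b with
  | nil => intro temp h; simp [go]
  | cons i xs ih =>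
    intro temp h
    have hc : ¬ temp.length + 1 = m := by simp at h; omega
    simp only [go, if_neg hc]
    rw [ih (temp ++ [i]) (by simp at h ⊢; omega)]
    simp

-- go across one full block
lemma go_block (m : Nat) : ∀ (a : List Int) (temp b : List Int),
    temp.length + a.length = m → a ≠ [] →
    go m temp (a ++ b) = (((temp ++ a) :: (go m [] b).1), (go m [] b).2) := by
  intro a
  induction a with
  | nil => intro temp b h hne; exact absurd rfl hne
  | cons i a ih =>
    intro temp b h hne
    by_cases ha : a = []
    · subst ha
      have hc : temp.length + 1 = m := by simp at h; omega
      simp [go, hc]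
    · have hc : ¬ temp.length + 1 = m := by
        have : 0 < a.length := List.length_pos_iff.mpr ha
        simp at h; omega
      simp only [List.cons_append, go, if_neg hc]
      rw [ih (temp ++ [i]) b (by simp at h ⊢; omega) ha]
      simp

-- closed form of go started empty: strided take/drop
lemma go_closed (m : Nat) (hm : 0 < m) : ∀ (N : Nat) (x : List Int), x.length ≤ N →
    go m [] x = ((List.range (x.length / m)).map (fun j => (x.drop (j * m)).take m),
                 x.drop ((x.length / m) * m)) := by
  intro N
  induction N with
  | zero =>
    intro x hx
    have : x = [] := List.eq_nil_of_length_eq_zero (by omega)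
    subst this
    simp [go, Nat.zero_div]
  | succ N ih =>
    intro x hx
    by_cases hs : x.length < m
    · have h0 : x.length / m = 0 := Nat.div_eq_of_lt hs
      rw [go_small m x [] (by simpa using hs)]
      simp [h0]
    · rw [not_lt] at hs
      have hx0 : x ≠ [] := by intro h; subst h; simp at hs; omega
      have hsplit : x = x.take m ++ x.drop m := (List.take_append_drop m x).symm
      have htl : (x.take m).length = m := by simp; omega
      have hne : x.take m ≠ [] := by
        intro h; rw [h] at htl; simp at htl; omega
      have hb := go_block m (x.take m) [] (x.drop m) (by simpa using htl) hne
      have hdl : (x.drop m).length = x.length - m := by simp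
      have hrec := ih (x.drop m) (by simp; omega)
      have hdiv : x.length / m = (x.length - m) / m + 1 :=
        Nat.div_eq_sub_div hm hs
      conv_lhs => rw [hsplit]
      rw [hb, hrec]
      rw [Prod.mk.injEq]
      constructor
      · rw [hdl, hdiv, List.range_succ_eq_map, List.map_cons, List.map_map]
        rw [List.cons.injEq]
        constructor
        · simp
        · apply List.map_congr_left
          intro j _
          simp only [Function.comp_apply]
          rw [List.drop_drop]
          congr 2
          rw [Nat.succ_eq_add_one]
          ring
      · rw [hdl, hdiv, List.drop_drop]
        ring_nf

-- B's strided slices are exactly go's closed form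
lemma alt_pair (x : List Int) (n : Int) (hn : 1 ≤ n) :
    ((PySem.List.pyRange 0 (PySem.Int.floordiv (x.length : Int) n) 1).map
        (fun i => PySem.List.slice x (some (i * n)) (some ((i + 1) * n))),
      PySem.List.slice x (some ((PySem.Int.floordiv (x.length : Int) n) * n)) none) =
      go n.natAbs [] x := by
  have hm : 0 < n.natAbs := Int.natAbs_pos.mpr (by omega)
  have habs : n = (n.natAbs : Int) := by omega
  have hk : PySem.Int.floordiv (x.length : Int) n = ((x.length / n.natAbs : Nat) : Int) := by
    rw [habs]; exact_mod_cast PySem.Int.floordiv_natCast x.length n.natAbs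
  rw [go_closed n.natAbs hm x.length x le_rfl, hk, habs]
  simp only [Int.natAbs_natCast]
  rw [Prod.mk.injEq]
  constructor
  · rw [PySem.List.pyRange_zero_nat, List.map_map]
    apply List.map_congr_left
    intro j _
    simp only [Function.comp]
    have h1 : ((j : Int)) * (n.natAbs : Int) = ((j * n.natAbs : Nat) : Int) := by push_cast; ring
    have h2 : ((j : Int) + 1) * (n.natAbs : Int) =
        ((j * n.natAbs : Nat) : Int) + ((n.natAbs : Nat) : Int) := by push_cast; ring
    rw [h1, h2, PySem.List.slice_natCast_add]
  · have h3 : ((x.length / n.natAbs : Nat) : Int) * (n.natAbs : Int) =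
        ((x.length / n.natAbs * n.natAbs : Nat) : Int) := by push_cast; ring
    rw [h3, PySem.List.slice_from_natCast]

-- ===== VERDICT (by name: the statement is the Claim_ definition above) =====
theorem change_bit_spec : Claim_equal_change_bit := by
  intro x n LSB _ hpre
  unfold Pre_change_bit at hpre
  unfold Spec_change_bit change_bit change_bit_alt
  have hn : n ≠ 0 := by omega
  have hpad : ∀ t : List Int,
      (PySem.List.pyRange 0 LSB 1).foldl (fun t _ => t ++ [(0 : Int)]) t =
        t ++ List.replicate LSB.toNat 0 := by
    intro t
    rw [pad_foldl]
    congr 2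
    rw [PySem.List.length_pyRange_one]
    omega
  have hfold := loopA n hn x [] [] 0 (by simp)
  simp only [Int.natCast_zero] at hfold
  rw [hfold]
  have halt := alt_pair x n hpre
  simp only [← halt]
  by_cases hL : LSB = 0
  · simp [hL]
  · simp [hL, hpad]
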